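-- pv_equiv track=rewrite | github.com/yannickloth/W33-Theory | exploration/w33_curved_a2_quadratic_seed_bridge.py | _coface_degrees
-- ===== SOURCE A (Python) =====
-- def _coface_degrees(
--     lower_faces: tuple[tuple[int, ...], ...],
--     higher_faces: tuple[tuple[int, ...], ...],
-- ) -> tuple[int, ...]:
--     degrees = []
--     higher_sets = [set(face) for face in higher_faces]
--     for lower in lower_faces:
--         lower_set = set(lower)
--         degrees.append(sum(1 for higher in higher_sets if lower_set.issubset(higher)))
--     return tuple(degrees)
-- ===== SOURCE B (Python) =====
-- def _issubset_sorted(a, b):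
--     i = j = 0
--     la, lb = len(a), len(b)
--     while i < la:
--         if j == lb:
--             return False
--         if a[i] == b[j]:
--             i += 1
--             j += 1
--         elif a[i] > b[j]:
--             j += 1
--         else:
--             return False
--     return True
--
--
-- def _coface_degrees(
--     lower_faces: tuple[tuple[int, ...], ...],
--     higher_faces: tuple[tuple[int, ...], ...],
-- ) -> tuple[int, ...]:
--     hs = [sorted(set(h)) for h in higher_faces]
--     memo = {}
--     out = []
--     for lower in lower_faces:
--         key = tuple(sorted(set(lower)))
--         if key not in memo:
--             memo[key] = sum(1 for h in hs if _issubset_sorted(key, h))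
--         out.append(memo[key])
--     return tuple(out)
-- ===== Notes on version B (the rewrite author's own statement) =====
-- stated objective: alternative
-- what changed: B canonicalises each face to its sorted deduplicated vertex list, tests containment by a two-pointer merge over the sorted lists instead of hash-set issubset, and memoises the count per distinct lower face in a dict so duplicate lower faces are never recounted.
import Mathlib
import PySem

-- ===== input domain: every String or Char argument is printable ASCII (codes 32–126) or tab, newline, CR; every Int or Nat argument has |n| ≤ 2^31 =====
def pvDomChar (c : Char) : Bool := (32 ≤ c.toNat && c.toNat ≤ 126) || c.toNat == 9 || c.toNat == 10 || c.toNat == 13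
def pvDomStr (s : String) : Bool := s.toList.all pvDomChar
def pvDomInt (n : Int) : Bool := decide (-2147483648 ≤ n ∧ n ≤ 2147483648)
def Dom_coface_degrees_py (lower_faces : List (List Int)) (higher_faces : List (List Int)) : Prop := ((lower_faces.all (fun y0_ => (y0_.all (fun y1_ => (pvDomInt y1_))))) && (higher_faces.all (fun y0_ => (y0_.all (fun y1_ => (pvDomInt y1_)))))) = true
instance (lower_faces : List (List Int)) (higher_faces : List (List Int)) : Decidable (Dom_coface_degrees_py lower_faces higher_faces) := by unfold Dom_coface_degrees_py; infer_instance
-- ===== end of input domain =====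

-- B replaces A's per-pair hash-set subset test by canonical sorted-dedup keys, a two-pointer
-- merge subset test, and a memo dict that computes each distinct lower face only once (objective: alternative).

-- ===== PORT A =====
-- literal port of A: higher_sets = [set(f) for f in higher_faces];
-- for each lower, append sum(1 for h in higher_sets if set(lower).issubset(h))
def coface_degrees_py (lower_faces : List (List Int)) (higher_faces : List (List Int)) : List Int :=
  let higher_sets : List (PySem.Set Int) := higher_faces.map (fun face => PySem.Set.ofList face)
  lower_faces.map (fun lower =>
    let lower_set : PySem.Set Int := PySem.Set.ofList lower
    (higher_sets.map (fun higher => if PySem.Set.issubset lower_set higher then (1 : Int) else 0)).sum)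

-- ===== PORT B =====
-- port of _issubset_sorted: the two-pointer while loop as recursion on the two lists
def issubsetSorted : List Int → List Int → Bool
  | [], _ => true
  | _ :: _, [] => false
  | a :: as, b :: bs =>
    if a = b then issubsetSorted as bs
    else if a > b then issubsetSorted (a :: as) bs
    else false

-- port of B: hs = [sorted(set(h)) for h in higher_faces]; one loop filling the memo dict
-- keyed by sorted(set(lower)) and appending memo[key] (present by construction, so getD)
def coface_degrees_py_alt (lower_faces : List (List Int)) (higher_faces : List (List Int)) : List Int :=
  let hs : List (List Int) := higher_faces.map (fun h => PySem.List.sorted (PySem.Set.ofList h) (fun x => x) false)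
  let step := fun (st : PySem.Dict (List Int) Int × List Int) (lower : List Int) =>
    let key := PySem.List.sorted (PySem.Set.ofList lower) (fun x => x) false
    let memo := if st.1.contains key then st.1
      else st.1.insert key ((hs.map (fun h => if issubsetSorted key h then (1 : Int) else 0)).sum)
    (memo, st.2 ++ [memo.getD key 0])
  (lower_faces.foldl step (PySem.Dict.empty, [])).2

-- ===== PRECONDITION & SPEC =====
def Spec_coface_degrees_py (lower_faces : List (List Int)) (higher_faces : List (List Int)) (out : List Int) : Prop := out = coface_degrees_py_alt lower_faces higher_faces
instance (lower_faces : List (List Int)) (higher_faces : List (List Int)) (out : List Int) : Decidable (Spec_coface_degrees_py lower_faces higher_faces out) := by unfold Spec_coface_degrees_py; infer_instance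

-- ===== CLAIM (what is proved, stated in full; the proofs are below) =====
def Claim_equal_coface_degrees_py : Prop := ∀ (lower_faces : List (List Int)) (higher_faces : List (List Int)), Dom_coface_degrees_py lower_faces higher_faces → Spec_coface_degrees_py lower_faces higher_faces (coface_degrees_py lower_faces higher_faces)

-- ===== LEMMAS AND PROOFS =====

-- the two-pointer subset test on strictly increasing lists IS the subset relation
theorem issubsetSorted_iff : ∀ (a b : List Int), a.Pairwise (· < ·) → b.Pairwise (· < ·) →
    (issubsetSorted a b = true ↔ ∀ x ∈ a, x ∈ b)
  | [], b, _, _ => by simp [issubsetSorted]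
  | a :: as, [], _, _ => by
    simp [issubsetSorted]
    exact ⟨a, fun h => absurd rfl h⟩
  | a :: as, b :: bs, ha, hb => by
    rw [List.pairwise_cons] at ha hb
    by_cases hab : a = b
    · have e : issubsetSorted (a :: as) (b :: bs) = issubsetSorted as bs := by
        simp [issubsetSorted, hab]
      have ih := issubsetSorted_iff as bs ha.2 hb.2
      rw [e, ih]
      constructor
      · intro h x hx
        rcases List.mem_cons.1 hx with rfl | hx2
        · exact List.mem_cons.2 (Or.inl hab)
        · exact List.mem_cons_of_mem _ (h x hx2)
      · intro h x hx
        have hxa := ha.1 x hx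
        have := h x (List.mem_cons_of_mem _ hx)
        rcases List.mem_cons.1 this with rfl | h2
        · exfalso; omega
        · exact h2
    · by_cases hgt : a > b
      · have ih := issubsetSorted_iff (a :: as) bs (List.pairwise_cons.2 ha) hb.2
        have e : issubsetSorted (a :: as) (b :: bs) = issubsetSorted (a :: as) bs := by
          simp [issubsetSorted, hab, hgt]
        rw [e, ih]
        constructor
        · intro h x hx
          exact List.mem_cons_of_mem _ (h x hx)
        · intro h x hx
          rcases List.mem_cons.1 (h x hx) with rfl | h2
          · rcases List.mem_cons.1 hx with rfl | hx2
            · omega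
            · have := ha.1 x hx2; omega
          · exact h2
      · have e : issubsetSorted (a :: as) (b :: bs) = false := by
          simp [issubsetSorted, hab, hgt]
        rw [e]
        constructor
        · intro h; cases h
        · intro h
          have := h a List.mem_cons_self
          rcases List.mem_cons.1 this with rfl | h2
          · exact absurd rfl hab
          · have := hb.1 a h2; omega
termination_by a b => a.length + b.length

-- B's per-key count over the sorted-dedup higher faces equals A's per-lower count over the higher sets
theorem count_eq (lower : List Int) (higher_faces : List (List Int)) :
    ((higher_faces.map (fun h => PySem.List.sorted (PySem.Set.ofList h) (fun x => x) false)).map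
      (fun h => if issubsetSorted (PySem.List.sorted (PySem.Set.ofList lower) (fun x => x) false) h then (1 : Int) else 0)).sum
    = ((higher_faces.map (fun face => PySem.Set.ofList face)).map
      (fun higher => if PySem.Set.issubset (PySem.Set.ofList lower) higher then (1 : Int) else 0)).sum := by
  simp only [List.map_map]
  congr 1
  apply List.map_congr_left
  intro h _
  simp only [Function.comp_apply]
  congr 1
  have e : issubsetSorted (PySem.List.sorted (PySem.Set.ofList lower) (fun x => x) false)
      (PySem.List.sorted (PySem.Set.ofList h) (fun x => x) false)
      = PySem.Set.issubset (PySem.Set.ofList lower) (PySem.Set.ofList h) := by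
    rw [Bool.eq_iff_iff]
    rw [issubsetSorted_iff _ _ (PySem.List.sorted_ofList_pairwise_lt lower)
      (PySem.List.sorted_ofList_pairwise_lt h), PySem.Set.issubset_iff]
    constructor
    · intro hsub x hx
      have := hsub x (by rwa [PySem.List.mem_sorted])
      rwa [PySem.List.mem_sorted] at this
    · intro hsub x hx
      rw [PySem.List.mem_sorted] at hx
      rw [PySem.List.mem_sorted]
      exact hsub x hx
  rw [e]

-- the memoising fold appends exactly c (key lower) for every lower face, given the memo invariant
theorem foldl_memo (c : List Int → Int) (key : List Int → List Int) :
    ∀ (lfs : List (List Int)) (memo : PySem.Dict (List Int) Int) (out : List Int),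
    (∀ k, memo.contains k = true → memo.getD k 0 = c k) →
    (lfs.foldl (fun st lower =>
        ((if st.1.contains (key lower) then st.1 else st.1.insert (key lower) (c (key lower))),
         st.2 ++ [(if st.1.contains (key lower) then st.1 else st.1.insert (key lower) (c (key lower))).getD (key lower) 0])) (memo, out)).2
      = out ++ lfs.map (fun l => c (key l))
  | [], memo, out, _ => by simp
  | lower :: lfs, memo, out, hinv => by
    simp only [List.foldl_cons, List.map_cons]
    by_cases hc : memo.contains (key lower) = true
    · simp only [hc, if_true]
      rw [foldl_memo c key lfs memo _ hinv, hinv _ hc]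
      simp
    · simp only [hc, if_false, Bool.false_eq_true]
      have hinv' : ∀ k, (memo.insert (key lower) (c (key lower))).contains k = true →
          (memo.insert (key lower) (c (key lower))).getD k 0 = c k := by
        intro k hk
        rw [PySem.Dict.getD_insert]
        split_ifs with he
        · rw [he]
        · rw [PySem.Dict.contains_insert] at hk
          simp only [Bool.or_eq_true, beq_iff_eq] at hk
          exact hinv k (hk.resolve_left he)
      rw [foldl_memo c key lfs _ _ hinv', PySem.Dict.getD_insert_self]
      simp
termination_by lfs => lfs.length

-- ===== VERDICT (by name: the statement is the Claim_ definition above) =====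
theorem coface_degrees_py_spec : Claim_equal_coface_degrees_py := by
  intro lower_faces higher_faces _
  unfold Spec_coface_degrees_py
  have h := foldl_memo
    (fun kk => (((higher_faces.map (fun hh => PySem.List.sorted (PySem.Set.ofList hh) (fun x => x) false))).map
        (fun hh => if issubsetSorted kk hh then (1 : Int) else 0)).sum)
    (fun l => PySem.List.sorted (PySem.Set.ofList l) (fun x => x) false)
    lower_faces PySem.Dict.empty []
    (by intro k hk; simp [PySem.Dict.contains_empty] at hk)
  refine Eq.trans ?_ h.symm
  simp only [List.nil_append, coface_degrees_py]
  apply List.map_congr_left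
  intro l _
  exact (count_eq l higher_faces).symm
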